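-- pv_equiv track=rewrite | github.com/Yursksf1/webPython_comfenalco | workshops/workshop_5/exercise_1.py | listar_menu_por_plato
-- ===== SOURCE A (Python) =====
-- def listar_menu_por_plato(menu):
--     listado_por_tipo_de_plato = {}
--     for item in menu:
--         tipo_plato = item[1]
--         nombre = item[2]
--         if tipo_plato not in listado_por_tipo_de_plato:
--             listado_por_tipo_de_plato[tipo_plato] = []
--
--         listado_por_tipo_de_plato[tipo_plato].append(nombre)
--
--     return listado_por_tipo_de_plato
-- ===== SOURCE B (Python) =====
-- def listar_menu_por_plato(menu):
--     tipos = []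
--     for item in menu:
--         if item[1] not in tipos:
--             tipos.append(item[1])
--     return {tipo: [item[2] for item in menu if item[1] == tipo] for tipo in tipos}
-- ===== Notes on version B (the rewrite author's own statement) =====
-- stated objective: alternative
-- what changed: Replaces the single-pass dict accumulation with a two-pass scheme: first collect the distinct dish types in first-appearance order, then rescan the menu once per type to gather its names.
import Mathlib
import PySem

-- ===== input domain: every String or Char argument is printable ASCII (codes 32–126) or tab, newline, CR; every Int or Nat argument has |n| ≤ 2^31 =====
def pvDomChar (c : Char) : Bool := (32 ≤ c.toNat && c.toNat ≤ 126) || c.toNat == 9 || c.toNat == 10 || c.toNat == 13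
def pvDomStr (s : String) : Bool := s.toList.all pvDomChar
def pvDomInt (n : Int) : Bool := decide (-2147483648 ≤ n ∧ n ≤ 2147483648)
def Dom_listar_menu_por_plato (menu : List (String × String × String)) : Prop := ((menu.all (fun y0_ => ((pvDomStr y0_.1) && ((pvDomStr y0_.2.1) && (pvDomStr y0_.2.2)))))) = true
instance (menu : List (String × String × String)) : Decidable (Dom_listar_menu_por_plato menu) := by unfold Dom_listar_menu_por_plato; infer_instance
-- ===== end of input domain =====

-- B replaces A's single-pass dict accumulation by a two-pass scheme (distinct types first, then one rescan per type); alternative decomposition, same result.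


-- ===== PORT A =====
-- literal port of A: fold the loop state (the dict) over menu; the Python dict is returned as its items list
def listar_menu_por_plato (menu : List (String × String × String)) : List (String × List String) :=
  (menu.foldl (fun d item =>
      let tipo_plato := item.2.1
      let nombre := item.2.2
      let d' := if d.contains tipo_plato then d else d.insert tipo_plato []
      d'.insert tipo_plato (d'.getD tipo_plato [] ++ [nombre]))
    PySem.Dict.empty).items

-- ===== PORT B =====
-- literal port of B: distinct types in first-appearance order, then one filter pass per type
def listar_menu_por_plato_alt (menu : List (String × String × String)) : List (String × List String) :=
  let tipos := menu.foldl (fun ts item => if item.2.1 ∈ ts then ts else ts ++ [item.2.1]) []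
  tipos.map (fun tipo => (tipo, (menu.filter (fun item => item.2.1 == tipo)).map (·.2.2)))

-- ===== PRECONDITION & SPEC =====
def Spec_listar_menu_por_plato (menu : List (String × String × String)) (out : List (String × List String)) : Prop := out = listar_menu_por_plato_alt menu
instance (menu : List (String × String × String)) (out : List (String × List String)) : Decidable (Spec_listar_menu_por_plato menu out) := by unfold Spec_listar_menu_por_plato; infer_instance

-- ===== CLAIM (what is proved, stated in full; the proofs are below) =====
def Claim_equal_listar_menu_por_plato : Prop := ∀ (menu : List (String × String × String)), Dom_listar_menu_por_plato menu → Spec_listar_menu_por_plato menu (listar_menu_por_plato menu)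

-- ===== LEMMAS AND PROOFS =====

-- A's loop body equals a single Dict.modify
theorem pv_step_eq_modify (d : PySem.Dict String (List String)) (item : String × String × String) :
    (let d' := if d.contains item.2.1 then d else d.insert item.2.1 []
     d'.insert item.2.1 (d'.getD item.2.1 [] ++ [item.2.2]))
    = d.modify item.2.1 [] (· ++ [item.2.2]) := by
  by_cases h : d.contains item.2.1
  · simp [h, PySem.Dict.modify, PySem.Dict.getD_eq_get?_getD]
  · have h' : d.contains item.2.1 = false := by simpa using h
    simp [h, PySem.Dict.insert_insert_self, PySem.Dict.modify,
      PySem.Dict.getD_of_not_contains d [] h']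

theorem pv_foldl_eq (menu : List (String × String × String)) :
    menu.foldl (fun d item =>
      let tipo_plato := item.2.1
      let nombre := item.2.2
      let d' := if d.contains tipo_plato then d else d.insert tipo_plato []
      d'.insert tipo_plato (d'.getD tipo_plato [] ++ [nombre])) PySem.Dict.empty
    = (menu.map (fun it => (it.2.1, it.2.2))).foldl
        (fun d p => d.modify p.1 [] (· ++ [p.2])) PySem.Dict.empty := by
  rw [List.foldl_map]
  exact PySem.List.foldl_congr_mem _ _ _ _ (fun d it _ => pv_step_eq_modify d it)

theorem pv_tipos_eq (menu : List (String × String × String)) :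
    menu.foldl (fun ts item => if item.2.1 ∈ ts then ts else ts ++ [item.2.1]) []
    = PySem.Set.ofList (menu.map (·.2.1)) := by
  rw [PySem.Set.ofList_eq_foldl, List.foldl_map]
  apply PySem.List.foldl_congr_mem
  intro s it _
  simp [PySem.Set.add, PySem.Set.contains]

theorem pv_keys_eq (l : List (String × String)) :
    (l.foldl (fun d p => d.modify p.1 [] (· ++ [p.2])) PySem.Dict.empty).keys
    = PySem.Set.ofList (l.map Prod.fst) := by
  have h := PySem.Dict.keys_foldl_modify_key l Prod.fst [] (fun _ p v => v ++ [p.2]) PySem.Dict.empty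
  simpa [PySem.Set.update, PySem.Set.ofList_eq_foldl] using h

-- the grouping fold, characterised as B computes it (over key-value pairs)
theorem pv_dict_items (l : List (String × String)) :
    (l.foldl (fun d p => d.modify p.1 [] (· ++ [p.2])) PySem.Dict.empty).items
    = (PySem.Set.ofList (l.map Prod.fst)).map
        (fun t => (t, (l.filter (fun p => p.1 == t)).map Prod.snd)) := by
  have hnd : ((l.foldl (fun d p => d.modify p.1 [] (· ++ [p.2])) PySem.Dict.empty).keys).Nodup :=
    PySem.Dict.nodup_keys_foldl_modify_key l Prod.fst [] (fun _ p v => v ++ [p.2])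
      PySem.Dict.empty PySem.Dict.nodup_keys_empty
  rw [PySem.Dict.items_eq_map_keys _ hnd [], pv_keys_eq]
  apply List.map_congr_left
  intro t _
  rw [PySem.Dict.getD_foldl_modify_append l PySem.Dict.empty t]
  simp

-- ===== VERDICT (by name: the statement is the Claim_ definition above) =====
theorem listar_menu_por_plato_spec : Claim_equal_listar_menu_por_plato := by
  intro menu _
  show listar_menu_por_plato menu = listar_menu_por_plato_alt menu
  unfold listar_menu_por_plato listar_menu_por_plato_alt
  rw [pv_foldl_eq, pv_tipos_eq, pv_dict_items]
  simp [List.map_map, List.filter_map, Function.comp_def]
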